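-- pv_equiv track=rewrite | github.com/alexjustdoit/personal-assistant | backend/services/briefing.py | _parse_curation
-- ===== SOURCE A (Python) =====
-- def _parse_curation(response: str, by_topic: dict[str, list[dict]]) -> list[dict]:
--     """Parse the LLM's structured curation response into a list of chosen articles."""
--     curated = []
--     current_topic = None
--     current_pick = 1
--     current_insight = ""
--
--     for line in response.splitlines():
--         line = line.strip()
--         if line.upper().startswith("TOPIC:"):
--             # Save previous block before starting a new one
--             if current_topic and current_topic in by_topic:
--                 articles = by_topic[current_topic]
--                 idx = max(0, min(current_pick - 1, len(articles) - 1))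
--                 article = dict(articles[idx])
--                 article["insight"] = current_insight
--                 curated.append(article)
--             # Look up topic name case-insensitively
--             raw = line[6:].strip()
--             match = next((t for t in by_topic if t.lower() == raw.lower()), raw)
--             current_topic = match
--             current_pick = 1
--             current_insight = ""
--         elif line.upper().startswith("PICK:"):
--             try:
--                 current_pick = int(line[5:].strip())
--             except ValueError:
--                 current_pick = 1
--         elif line.upper().startswith("INSIGHT:"):
--             current_insight = line[8:].strip()
--
--     # Save the last block
--     if current_topic and current_topic in by_topic:
--         articles = by_topic[current_topic]
--         idx = max(0, min(current_pick - 1, len(articles) - 1))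
--         article = dict(articles[idx])
--         article["insight"] = current_insight
--         curated.append(article)
--
--     # Fill in any topics the LLM skipped — use top article, no insight
--     covered = {a["topic"] for a in curated}
--     for topic, articles in by_topic.items():
--         if topic not in covered and articles:
--             fallback = dict(articles[0])
--             fallback["insight"] = ""
--             curated.append(fallback)
--
--     return curated
-- ===== SOURCE B (Python) =====
-- def _parse_curation(response: str, by_topic: dict[str, list[dict]]) -> list[dict]:
--     """Parse the LLM's curation text: first cut the text into TOPIC blocks (raw
--     topic, last PICK, last INSIGHT), then resolve/emit each block, then append
--     fallbacks for uncovered topics."""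
--     # Pass 1: collect blocks as [raw_topic, pick, insight] records.
--     blocks = []
--     cur = None
--     for line in response.splitlines():
--         line = line.strip()
--         u = line.upper()
--         if u.startswith("TOPIC:"):
--             if cur is not None:
--                 blocks.append(cur)
--             cur = [line[6:].strip(), 1, ""]
--         elif cur is not None and u.startswith("PICK:"):
--             try:
--                 cur[1] = int(line[5:].strip())
--             except ValueError:
--                 cur[1] = 1
--         elif cur is not None and u.startswith("INSIGHT:"):
--             cur[2] = line[8:].strip()
--     if cur is not None:
--         blocks.append(cur)
--
--     # Pass 2: resolve each block's topic case-insensitively and emit an article.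
--     curated = []
--     for raw, pick, insight in blocks:
--         name = next((t for t in by_topic if t.lower() == raw.lower()), raw)
--         if name and name in by_topic:
--             arts = by_topic[name]
--             idx = max(0, min(pick - 1, len(arts) - 1))
--             curated.append({**arts[idx], "insight": insight})
--
--     # Fallbacks for topics no emitted article covers.
--     covered = {a["topic"] for a in curated}
--     return curated + [{**arts[0], "insight": ""}
--                       for t, arts in by_topic.items() if t not in covered and arts]
-- ===== Notes on version B (the rewrite author's own statement) =====
-- stated objective: alternative
-- what changed: A interleaves parsing and emission in one stateful scan (resolving topics and flushing an article at each TOPIC line); B is a two-pass decomposition: first cut the text into raw (topic, pick, insight) block records, then resolve and emit each record, with the fallback loop replaced by a filter+map comprehension.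
import Mathlib
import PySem

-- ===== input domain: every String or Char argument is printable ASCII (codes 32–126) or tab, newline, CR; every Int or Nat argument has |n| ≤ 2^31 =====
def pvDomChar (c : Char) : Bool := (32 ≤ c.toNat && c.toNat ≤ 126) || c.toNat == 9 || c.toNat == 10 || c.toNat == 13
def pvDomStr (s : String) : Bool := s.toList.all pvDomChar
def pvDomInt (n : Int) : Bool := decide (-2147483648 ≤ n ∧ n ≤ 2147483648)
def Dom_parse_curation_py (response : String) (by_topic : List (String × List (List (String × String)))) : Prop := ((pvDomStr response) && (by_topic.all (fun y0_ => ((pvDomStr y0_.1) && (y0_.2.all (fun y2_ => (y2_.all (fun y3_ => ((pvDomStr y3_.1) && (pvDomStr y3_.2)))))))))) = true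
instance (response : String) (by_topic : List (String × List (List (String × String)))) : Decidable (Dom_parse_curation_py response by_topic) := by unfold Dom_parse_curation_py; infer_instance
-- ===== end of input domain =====

-- B replaces A's interleaved state machine (resolve topic and flush an article while
-- scanning the lines) by a two-pass decomposition: cut the text into raw TOPIC-block
-- records first, then resolve and emit each record, then append fallbacks as a
-- filter+map comprehension; objective: alternative decomposition (same cost).

-- ===== PORT A =====
-- A's "save previous block" code (duplicated in the Python before each TOPIC: line and
-- after the loop).  Dict lookups use getD with a default; the default is only reached
-- where the Python raises (empty article list / missing key) and nothing more is claimed.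
def pyA_save (by_topic : List (String × List (List (String × String))))
    (curated : List (List (String × String))) (topic? : Option String)
    (pick : Int) (insight : String) : List (List (String × String)) :=
  match topic? with
  | none => curated
  | some t =>
    if !(t == "") && (PySem.Dict.mk by_topic).contains t then
      let articles := (PySem.Dict.mk by_topic).getD t []
      let idx := max 0 (min (pick - 1) (PySem.List.len articles - 1))
      let article := (PySem.Dict.mk (PySem.List.pyGetD articles idx [])).insert "insight" insight
      curated ++ [article.items]
    else curated

-- one iteration of A's for-loop; state = (curated, current_topic, current_pick, current_insight)
def pyA_step (by_topic : List (String × List (List (String × String))))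
    (st : List (List (String × String)) × Option String × Int × String)
    (line0 : String) : List (List (String × String)) × Option String × Int × String :=
  let line := PySem.Str.strip line0
  if PySem.Str.startswith (PySem.Str.upper line) "TOPIC:" then
    let curated := pyA_save by_topic st.1 st.2.1 st.2.2.1 st.2.2.2
    let raw := PySem.Str.strip (PySem.Str.slice line (some 6) none)
    let m := (((PySem.Dict.mk by_topic).keys.find?
        (fun t => PySem.Str.lower t == PySem.Str.lower raw)).getD raw)
    (curated, some m, 1, "")
  else if PySem.Str.startswith (PySem.Str.upper line) "PICK:" then
    (st.1, st.2.1, (PySem.Int.ofStr? (PySem.Str.strip (PySem.Str.slice line (some 5) none))).getD 1, st.2.2.2)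
  else if PySem.Str.startswith (PySem.Str.upper line) "INSIGHT:" then
    (st.1, st.2.1, st.2.2.1, PySem.Str.strip (PySem.Str.slice line (some 8) none))
  else st

def parse_curation_py (response : String) (by_topic : List (String × List (List (String × String)))) : List (List (String × String)) :=
  let st := (PySem.Str.splitlines response).foldl (pyA_step by_topic) ([], none, 1, "")
  let curated := pyA_save by_topic st.1 st.2.1 st.2.2.1 st.2.2.2
  let covered : PySem.Set String :=
    PySem.Set.ofList (curated.map (fun a => (PySem.Dict.mk a).getD "topic" ""))
  (PySem.Dict.mk by_topic).items.foldl
    (fun acc p => if !(PySem.Set.contains covered p.1) && !p.2.isEmpty then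
        acc ++ [((PySem.Dict.mk (PySem.List.pyGetD p.2 0 [])).insert "insight" "").items]
      else acc) curated

-- ===== PORT B =====
-- B pass 2: resolve the block's raw topic case-insensitively, emit the picked article.
def pyB_resolve (by_topic : List (String × List (List (String × String)))) (raw : String) : String :=
  ((PySem.Dict.mk by_topic).keys.find?
      (fun t => PySem.Str.lower t == PySem.Str.lower raw)).getD raw

def pyB_emit (by_topic : List (String × List (List (String × String))))
    (b : String × Int × String) : List (List (String × String)) :=
  let name := pyB_resolve by_topic b.1
  if !(name == "") && (PySem.Dict.mk by_topic).contains name then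
    let arts := (PySem.Dict.mk by_topic).getD name []
    let idx := max 0 (min (b.2.1 - 1) (PySem.List.len arts - 1))
    [((PySem.Dict.mk (PySem.List.pyGetD arts idx [])).insert "insight" b.2.2).items]
  else []

-- B pass 1: one iteration of the block collector; state = (blocks, current block or none)
def pyB_step (st : List (String × Int × String) × Option (String × Int × String))
    (line0 : String) : List (String × Int × String) × Option (String × Int × String) :=
  let line := PySem.Str.strip line0
  if PySem.Str.startswith (PySem.Str.upper line) "TOPIC:" then
    ((match st.2 with | some c => st.1 ++ [c] | none => st.1),
     some (PySem.Str.strip (PySem.Str.slice line (some 6) none), (1 : Int), ""))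
  else
    match st.2 with
    | none => st
    | some c =>
      if PySem.Str.startswith (PySem.Str.upper line) "PICK:" then
        (st.1, some (c.1, (PySem.Int.ofStr? (PySem.Str.strip (PySem.Str.slice line (some 5) none))).getD 1, c.2.2))
      else if PySem.Str.startswith (PySem.Str.upper line) "INSIGHT:" then
        (st.1, some (c.1, c.2.1, PySem.Str.strip (PySem.Str.slice line (some 8) none)))
      else st

def parse_curation_py_alt (response : String) (by_topic : List (String × List (List (String × String)))) : List (List (String × String)) :=
  let st := (PySem.Str.splitlines response).foldl pyB_step ([], none)
  let blocks := st.1 ++ (match st.2 with | some c => [c] | none => [])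
  let curated := blocks.foldl (fun acc b => acc ++ pyB_emit by_topic b) []
  let covered : PySem.Set String :=
    PySem.Set.ofList (curated.map (fun a => (PySem.Dict.mk a).getD "topic" ""))
  curated ++ (((PySem.Dict.mk by_topic).items.filter
      (fun p => !(PySem.Set.contains covered p.1) && !p.2.isEmpty)).map
      (fun p => ((PySem.Dict.mk (PySem.List.pyGetD p.2 0 [])).insert "insight" "").items))

-- ===== PRECONDITION & SPEC =====
-- (no Pre_: the two ports agree on every input.  Where the Python raises — an article
-- list that is empty or an emitted article without a "topic" key — both ports take the
-- same getD default, so nothing weaker is claimed than port-level equality on Dom.)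
def Spec_parse_curation_py (response : String) (by_topic : List (String × List (List (String × String)))) (out : List (List (String × String))) : Prop := out = parse_curation_py_alt response by_topic
instance (response : String) (by_topic : List (String × List (List (String × String)))) (out : List (List (String × String))) : Decidable (Spec_parse_curation_py response by_topic out) := by unfold Spec_parse_curation_py; infer_instance

-- ===== CLAIM (what is proved, stated in full; the proofs are below) =====
def Claim_equal_parse_curation_py : Prop := ∀ (response : String) (by_topic : List (String × List (List (String × String)))), Dom_parse_curation_py response by_topic → Spec_parse_curation_py response by_topic (parse_curation_py response by_topic)

-- ===== LEMMAS AND PROOFS =====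

-- the simulation relation between A's loop state and B's pass-1 state
def pvRel (by_topic : List (String × List (List (String × String))))
    (sa : List (List (String × String)) × Option String × Int × String)
    (sb : List (String × Int × String) × Option (String × Int × String)) : Prop :=
  sa.1 = sb.1.flatMap (pyB_emit by_topic)
  ∧ match sb.2 with
    | none => sa.2.1 = none
    | some c => sa.2.1 = some (pyB_resolve by_topic c.1) ∧ sa.2.2.1 = c.2.1 ∧ sa.2.2.2 = c.2.2

theorem pv_save_emit (by_topic : List (String × List (List (String × String))))
    (curated : List (List (String × String))) (c : String × Int × String) :
    pyA_save by_topic curated (some (pyB_resolve by_topic c.1)) c.2.1 c.2.2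
      = curated ++ pyB_emit by_topic c := by
  simp only [pyA_save, pyB_emit]
  split <;> simp

theorem pv_step_rel (by_topic : List (String × List (List (String × String))))
    (sa : List (List (String × String)) × Option String × Int × String)
    (sb : List (String × Int × String) × Option (String × Int × String)) (line : String)
    (h : pvRel by_topic sa sb) :
    pvRel by_topic (pyA_step by_topic sa line) (pyB_step sb line) := by
  obtain ⟨ca, ta, pa, ia⟩ := sa
  obtain ⟨bs, cur⟩ := sb
  simp only [pvRel] at h
  by_cases hT : PySem.Str.startswith (PySem.Str.upper (PySem.Str.strip line)) "TOPIC:" = true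
  · cases cur with
    | none =>
      obtain ⟨h1, h2⟩ := h
      simp only [pyA_step, pyB_step, hT, if_true, pvRel]
      subst h1 h2
      refine ⟨by simp [pyA_save], ?_⟩
      simp [pyB_resolve]
    | some c =>
      obtain ⟨h1, e1, e2, e3⟩ := h
      simp only [pyA_step, pyB_step, hT, if_true, pvRel]
      subst h1 e1 e2 e3
      refine ⟨?_, ?_⟩
      · rw [pv_save_emit by_topic _ c]; simp
      · simp [pyB_resolve]
  · cases cur with
    | none =>
      obtain ⟨h1, h2⟩ := h
      subst h1 h2
      simp only [pyA_step, pyB_step, if_neg hT, pvRel]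
      split_ifs <;> exact ⟨rfl, rfl⟩
    | some c =>
      obtain ⟨h1, e1, e2, e3⟩ := h
      subst h1 e1 e2 e3
      simp only [pyA_step, pyB_step, if_neg hT, pvRel]
      split_ifs <;> exact ⟨rfl, rfl, rfl, rfl⟩

theorem pv_fold_rel (by_topic : List (String × List (List (String × String))))
    (lines : List String)
    (sa : List (List (String × String)) × Option String × Int × String)
    (sb : List (String × Int × String) × Option (String × Int × String))
    (h : pvRel by_topic sa sb) :
    pvRel by_topic (lines.foldl (pyA_step by_topic) sa) (lines.foldl pyB_step sb) := by
  induction lines generalizing sa sb with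
  | nil => exact h
  | cons l ls ih =>
    rw [List.foldl_cons, List.foldl_cons]
    exact ih _ _ (pv_step_rel by_topic sa sb l h)

-- after the loop, A's curated list (final save included) equals B's emitted block list
theorem pv_curated_eq (response : String) (by_topic : List (String × List (List (String × String)))) :
    (let st := (PySem.Str.splitlines response).foldl (pyA_step by_topic) ([], none, 1, "")
     pyA_save by_topic st.1 st.2.1 st.2.2.1 st.2.2.2)
    = (let st := (PySem.Str.splitlines response).foldl pyB_step ([], none)
       let blocks := st.1 ++ (match st.2 with | some c => [c] | none => [])
       blocks.foldl (fun acc b => acc ++ pyB_emit by_topic b) []) := by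
  obtain ⟨h1, h2⟩ := pv_fold_rel by_topic (PySem.Str.splitlines response)
      ([], none, 1, "") ([], none) ⟨rfl, rfl⟩
  simp only [PySem.List.foldl_append_eq_flatMap, List.nil_append]
  cases hc : ((PySem.Str.splitlines response).foldl pyB_step ([], none)).2 with
  | none =>
    rw [hc] at h2
    simp only [List.append_nil]
    rw [h2, h1]
    simp [pyA_save]
  | some c =>
    rw [hc] at h2
    obtain ⟨e1, e2, e3⟩ := h2
    rw [e1, e2, e3, h1, pv_save_emit by_topic _ c]
    simp

-- ===== VERDICT (by name: the statement is the Claim_ definition above) =====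
theorem parse_curation_py_spec : Claim_equal_parse_curation_py := by
  intro response by_topic _
  unfold Spec_parse_curation_py parse_curation_py parse_curation_py_alt
  have hc := pv_curated_eq response by_topic
  simp only at hc
  rw [PySem.List.foldl_append_if]
  rw [hc]
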